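-- pv_equiv track=rewrite | github.com/nehatiwari5406-stack/visafit-ai | app.py | hard_blocker_note
-- ===== SOURCE A (Python) =====
-- HARD_AUTHORIZATION_BLOCKERS = [
--     "u.s. citizenship is required",
--     "us citizenship is required",
--     "u.s. citizen required",
--     "us citizen required",
--     "must be a u.s. citizen",
--     "must be a us citizen",
--     "u.s. citizens only",
--     "us citizens only",
--     "citizenship is required",
--     "security clearance required",
--     "active security clearance",
--     "ability to obtain security clearance",
--     "clearance required",
--     "requires government clearance",
--     "due to the nature of work performed, u.s. citizenship is required",
--     "due to the nature of work performed, us citizenship is required",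
--     "no sponsorship",
--     "will not sponsor",
--     "sponsorship is not available",
--     "must be authorized to work without sponsorship",
--     "must be authorized to work in the united states without sponsorship",
--     "must be authorized to work in the us without sponsorship",
-- ]
--
-- def hard_blocker_note(risk_matches):
--     blocker_matches = [match for match in risk_matches if match in HARD_AUTHORIZATION_BLOCKERS]
--     if not blocker_matches:
--         return ""
--     if any("clearance" in match for match in blocker_matches):
--         blocker_type = "security clearance"
--     elif any("citizen" in match or "citizenship" in match for match in blocker_matches):
--         blocker_type = "U.S. citizenship"
--     else:
--         blocker_type = blocker_matches[0]
--     return (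
--         "Hard authorization blocker detected: the posting requires "
--         f"{blocker_type}, so the recommended decision is Skip regardless of resume fit."
--     )
-- ===== SOURCE B (Python) =====
-- HARD_AUTHORIZATION_BLOCKERS = [
--     "u.s. citizenship is required",
--     "us citizenship is required",
--     "u.s. citizen required",
--     "us citizen required",
--     "must be a u.s. citizen",
--     "must be a us citizen",
--     "u.s. citizens only",
--     "us citizens only",
--     "citizenship is required",
--     "security clearance required",
--     "active security clearance",
--     "ability to obtain security clearance",
--     "clearance required",
--     "requires government clearance",
--     "due to the nature of work performed, u.s. citizenship is required",
--     "due to the nature of work performed, us citizenship is required",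
--     "no sponsorship",
--     "will not sponsor",
--     "sponsorship is not available",
--     "must be authorized to work without sponsorship",
--     "must be authorized to work in the united states without sponsorship",
--     "must be authorized to work in the us without sponsorship",
-- ]
--
-- def hard_blocker_note(risk_matches):
--     first = None
--     has_clearance = False
--     has_citizen = False
--     for match in risk_matches:
--         if match in HARD_AUTHORIZATION_BLOCKERS:
--             if first is None:
--                 first = match
--             if "clearance" in match:
--                 has_clearance = True
--             if "citizen" in match:
--                 has_citizen = True
--     if first is None:
--         return ""
--     if has_clearance:
--         blocker_type = "security clearance"
--     elif has_citizen:
--         blocker_type = "U.S. citizenship"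
--     else:
--         blocker_type = first
--     return (
--         "Hard authorization blocker detected: the posting requires "
--         f"{blocker_type}, so the recommended decision is Skip regardless of resume fit."
--     )
-- ===== Notes on version B (the rewrite author's own statement) =====
-- stated objective: simpler
-- what changed: Replaced the filter pass plus two any() rescans and the [0] lookup by a single fold over risk_matches that tracks the first blocker and two boolean flags (clearance/citizen), choosing the blocker type from that state after the loop.
import Mathlib
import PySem

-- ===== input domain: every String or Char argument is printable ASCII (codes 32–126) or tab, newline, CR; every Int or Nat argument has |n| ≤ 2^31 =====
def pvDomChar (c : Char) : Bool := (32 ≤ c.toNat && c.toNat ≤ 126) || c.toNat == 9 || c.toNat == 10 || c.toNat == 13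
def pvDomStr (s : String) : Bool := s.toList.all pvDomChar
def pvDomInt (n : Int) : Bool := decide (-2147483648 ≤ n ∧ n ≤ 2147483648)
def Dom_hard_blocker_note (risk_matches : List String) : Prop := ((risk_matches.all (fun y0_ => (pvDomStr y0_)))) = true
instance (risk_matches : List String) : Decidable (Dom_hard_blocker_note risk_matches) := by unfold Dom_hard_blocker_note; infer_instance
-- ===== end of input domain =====

-- B replaces A's filter-plus-two-any rescans by one fold that tracks the first blocker and two flags (objective: simpler, one pass).

-- ===== PORT A =====
def HARD_AUTHORIZATION_BLOCKERS : List String := [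
  "u.s. citizenship is required",
  "us citizenship is required",
  "u.s. citizen required",
  "us citizen required",
  "must be a u.s. citizen",
  "must be a us citizen",
  "u.s. citizens only",
  "us citizens only",
  "citizenship is required",
  "security clearance required",
  "active security clearance",
  "ability to obtain security clearance",
  "clearance required",
  "requires government clearance",
  "due to the nature of work performed, u.s. citizenship is required",
  "due to the nature of work performed, us citizenship is required",
  "no sponsorship",
  "will not sponsor",
  "sponsorship is not available",
  "must be authorized to work without sponsorship",
  "must be authorized to work in the united states without sponsorship",
  "must be authorized to work in the us without sponsorship"]

def pvNote (blocker_type : String) : String :=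
  "Hard authorization blocker detected: the posting requires " ++ blocker_type ++
  ", so the recommended decision is Skip regardless of resume fit."

def hard_blocker_note (risk_matches : List String) : String :=
  let blocker_matches := risk_matches.filter (fun m => HARD_AUTHORIZATION_BLOCKERS.contains m)
  if blocker_matches.isEmpty then ""
  else
    let blocker_type :=
      if blocker_matches.any (fun m => PySem.Str.isIn "clearance" m) then "security clearance"
      else if blocker_matches.any (fun m => PySem.Str.isIn "citizen" m || PySem.Str.isIn "citizenship" m) then "U.S. citizenship"
      else PySem.List.pyGetD blocker_matches 0 ""
    pvNote blocker_type

-- ===== PORT B =====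
-- loop state: (first blocker seen or none, has_clearance, has_citizen)
def pvStep (st : Option String × Bool × Bool) (m : String) : Option String × Bool × Bool :=
  if HARD_AUTHORIZATION_BLOCKERS.contains m then
    (st.1.or (some m),
     st.2.1 || PySem.Str.isIn "clearance" m,
     st.2.2 || PySem.Str.isIn "citizen" m)
  else st

def hard_blocker_note_alt (risk_matches : List String) : String :=
  let st := risk_matches.foldl pvStep (none, false, false)
  match st.1 with
  | none => ""
  | some first =>
    let blocker_type :=
      if st.2.1 then "security clearance"
      else if st.2.2 then "U.S. citizenship"
      else first
    pvNote blocker_type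

-- ===== PRECONDITION & SPEC =====
def Spec_hard_blocker_note (risk_matches : List String) (out : String) : Prop := out = hard_blocker_note_alt risk_matches
instance (risk_matches : List String) (out : String) : Decidable (Spec_hard_blocker_note risk_matches out) := by unfold Spec_hard_blocker_note; infer_instance

-- ===== CLAIM (what is proved, stated in full; the proofs are below) =====
def Claim_equal_hard_blocker_note : Prop := ∀ (risk_matches : List String), Dom_hard_blocker_note risk_matches → Spec_hard_blocker_note risk_matches (hard_blocker_note risk_matches)

-- ===== LEMMAS AND PROOFS =====

-- "citizenship" in m implies "citizen" in m, so A's second disjunct is redundant.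
lemma cit_or (m : String) :
    (PySem.Str.isIn "citizen" m || PySem.Str.isIn "citizenship" m) = PySem.Str.isIn "citizen" m := by
  cases h : PySem.Str.isIn "citizenship" m with
  | false => rw [Bool.or_false]
  | true =>
    have h1 : "citizenship".toList <:+: m.toList := (PySem.Str.isIn_iff_infix _ _).mp h
    have h2 : "citizen".toList <:+: m.toList :=
      List.IsInfix.trans ((by decide : "citizen".toList <+: "citizenship".toList).isInfix) h1
    have h3 : PySem.Str.isIn "citizen" m = true := (PySem.Str.isIn_iff_infix _ _).mpr h2
    rw [h3]; decide

-- characterisation of B's fold in terms of A's filtered list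
lemma fold_state (rm : List String) (f : Option String) (c z : Bool) :
    rm.foldl pvStep (f, c, z) =
      (f.or ((rm.filter (fun m => HARD_AUTHORIZATION_BLOCKERS.contains m)).head?),
       c || (rm.filter (fun m => HARD_AUTHORIZATION_BLOCKERS.contains m)).any (fun m => PySem.Str.isIn "clearance" m),
       z || (rm.filter (fun m => HARD_AUTHORIZATION_BLOCKERS.contains m)).any (fun m => PySem.Str.isIn "citizen" m)) := by
  induction rm generalizing f c z with
  | nil => simp
  | cons a t ih =>
    by_cases hm : a ∈ HARD_AUTHORIZATION_BLOCKERS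
    · cases f <;> simp [List.foldl_cons, pvStep, hm, ih, Bool.or_assoc]
    · simp [List.foldl_cons, pvStep, hm, ih]

theorem hbn_eq (rm : List String) : hard_blocker_note rm = hard_blocker_note_alt rm := by
  unfold hard_blocker_note hard_blocker_note_alt
  rw [fold_state]
  cases hbm : rm.filter (fun m => HARD_AUTHORIZATION_BLOCKERS.contains m) with
  | nil => simp
  | cons b bs =>
    simp only [List.isEmpty_cons, List.head?_cons, Option.none_or,
      Bool.false_or, if_neg (by simp : ¬ (false = true))]
    simp only [cit_or]
    rcases hc : (b :: bs).any (fun m => PySem.Str.isIn "clearance" m) with _ | _ <;>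
      rcases hz : (b :: bs).any (fun m => PySem.Str.isIn "citizen" m) with _ | _ <;>
        simp [PySem.List.pyGetD, PySem.List.pyIdx?, PySem.List.pyGet?]

-- ===== VERDICT (by name: the statement is the Claim_ definition above) =====
theorem hard_blocker_note_spec : Claim_equal_hard_blocker_note := by
  intro rm _
  unfold Spec_hard_blocker_note
  exact hbn_eq rm
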